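-- pv_equiv track=rewrite | github.com/pypi-data/pypi-mirror-65 | packages/funcgenom/funcgenom-0.1.8.tar.gz/funcgenom-0.1.8/funcgenom/funcgenom.py | annotate_variants
-- ===== SOURCE A (Python) =====
-- def annotate_variants(variant_positions, annotations, annotation_subset=None):
--     annotations_per_variant = []
--     for variant_position in variant_positions:
--         annotations_per_variant.append(set())
--         for annotation_name, interval_list in annotations.items():
--             empty_interval_count = 0
--             for interval in interval_list:
--                 if interval[1] < variant_position:
--                     empty_interval_count += 1
--                 elif interval[0] > variant_position:
--                     break
--                 else:
--                     if annotation_subset: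
--                         if annotation_name in annotation_subset:
--                             annotations_per_variant[-1].add(annotation_name)
--                     else:
--                         annotations_per_variant[-1].add(annotation_name)
--                     break
--             for x in range(empty_interval_count):
--                 interval_list.pop(0)
--     return annotations_per_variant
-- ===== SOURCE B (Python) =====
-- def annotate_variants(variant_positions, annotations, annotation_subset=None):
--     # annotation-major sweep: one forward pointer per annotation over its
--     # interval list, producing a hit column; then assemble one set per variant.
--     columns = []
--     for annotation_name, interval_list in annotations.items():
--         j, n = 0, len(interval_list)
--         column = []
--         for variant_position in variant_positions:
--             while j < n and interval_list[j][1] < variant_position: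
--                 j += 1
--             column.append(j < n and interval_list[j][0] <= variant_position)
--         columns.append((annotation_name, column))
--     result = []
--     for i in range(len(variant_positions)):
--         s = set()
--         for annotation_name, column in columns:
--             if column[i]:
--                 if annotation_subset:
--                     if annotation_name in annotation_subset:
--                         s.add(annotation_name)
--                 else:
--                     s.add(annotation_name)
--         result.append(s)
--     return result
-- ===== Notes on version B (the rewrite author's own statement) =====
-- stated objective: alternative
-- what changed: A loops variant-major, rescanning and destructively popping each annotation's interval list per variant; B loops annotation-major, sweeping each interval list once with a forward pointer to build a hit column per annotation, then assembles the per-variant sets from the columns.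
import Mathlib
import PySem

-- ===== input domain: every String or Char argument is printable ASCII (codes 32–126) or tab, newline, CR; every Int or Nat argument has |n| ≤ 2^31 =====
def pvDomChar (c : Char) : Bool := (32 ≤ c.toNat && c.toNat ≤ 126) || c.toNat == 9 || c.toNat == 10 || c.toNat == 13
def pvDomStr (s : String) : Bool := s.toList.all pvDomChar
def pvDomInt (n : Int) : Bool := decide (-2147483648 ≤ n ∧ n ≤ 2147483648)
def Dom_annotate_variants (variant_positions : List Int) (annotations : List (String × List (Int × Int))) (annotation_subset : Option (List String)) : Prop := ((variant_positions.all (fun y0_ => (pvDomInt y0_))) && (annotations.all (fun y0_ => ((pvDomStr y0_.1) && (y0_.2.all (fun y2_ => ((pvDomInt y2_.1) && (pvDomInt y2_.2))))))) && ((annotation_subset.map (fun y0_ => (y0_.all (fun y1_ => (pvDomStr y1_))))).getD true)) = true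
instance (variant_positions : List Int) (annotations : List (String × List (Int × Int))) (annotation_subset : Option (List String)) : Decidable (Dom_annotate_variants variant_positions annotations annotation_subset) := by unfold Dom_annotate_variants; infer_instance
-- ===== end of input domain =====

-- B replaces A's variant-major rescan with destructive popping by an annotation-major
-- forward-pointer sweep (alternative decomposition; return values proved equal).
-- NOTE: Python A mutates `annotations` in place (pops consumed intervals); B does not.
-- The equivalence proved here is about the RETURN value only.

-- ===== PORT A =====
-- shared with port B: the `if annotation_subset: if name in annotation_subset: add / else: add` logic
def pvAdd (annotation_subset : Option (List String)) (s : PySem.Set String) (n : String) : PySem.Set String :=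
  match annotation_subset with
  | none => PySem.Set.add s n
  | some sub => if sub.isEmpty then PySem.Set.add s n
                else if sub.contains n then PySem.Set.add s n else s

-- A's inner `for interval in interval_list` loop: (empty_interval_count, name-was-added flag)
def pvScanA (interval_list : List (Int × Int)) (variant_position : Int) : Nat × Bool :=
  match interval_list with
  | [] => (0, false)
  | iv :: rest =>
    if iv.2 < variant_position then
      let r := pvScanA rest variant_position
      (r.1 + 1, r.2)
    else if iv.1 > variant_position then (0, false)
    else (0, true)

-- A's `for x in range(empty_interval_count): interval_list.pop(0)`
def pvPopN (c : Nat) (l : List (Int × Int)) : List (Int × Int) :=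
  match c with
  | 0 => l
  | Nat.succ c => pvPopN c l.tail

-- body of A's `for annotation_name, interval_list in annotations.items()` loop
def pvStepInnerA (annotation_subset : Option (List String)) (variant_position : Int)
    (st2 : List (String × List (Int × Int)) × PySem.Set String)
    (av : String × List (Int × Int)) : List (String × List (Int × Int)) × PySem.Set String :=
  let r := pvScanA av.2 variant_position
  let s' := if r.2 then pvAdd annotation_subset st2.2 av.1 else st2.2
  (st2.1 ++ [(av.1, pvPopN r.1 av.2)], s')

-- body of A's `for variant_position in variant_positions` loop
def pvStepA (annotation_subset : Option (List String))
    (st : List (List String) × List (String × List (Int × Int)))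
    (variant_position : Int) : List (List String) × List (String × List (Int × Int)) :=
  let inner := st.2.foldl (pvStepInnerA annotation_subset variant_position)
    (([] : List (String × List (Int × Int))), PySem.Set.empty)
  (st.1 ++ [inner.2], inner.1)

def annotate_variants (variant_positions : List Int) (annotations : List (String × List (Int × Int))) (annotation_subset : Option (List String)) : List (List String) :=
  (variant_positions.foldl (pvStepA annotation_subset)
    ((([] : List (List String)), annotations))).1

-- ===== PORT B =====
-- B's per-annotation pointer sweep: the list suffix from index j plays the pointer
def pvColumn (interval_list : List (Int × Int)) (variant_positions : List Int) : List Bool :=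
  match variant_positions with
  | [] => []
  | p :: ps =>
    let rest := interval_list.dropWhile (fun iv => iv.2 < p)
    let hit : Bool := match rest with | [] => false | iv :: _ => iv.1 ≤ p
    hit :: pvColumn rest ps

-- B's per-variant assembly loop over the hit columns
def pvAssemble (annotation_subset : Option (List String)) (columns : List (String × List Bool)) (i : Nat) : List String :=
  columns.foldl (fun s c => if c.2.getD i false then pvAdd annotation_subset s c.1 else s) PySem.Set.empty

def annotate_variants_alt (variant_positions : List Int) (annotations : List (String × List (Int × Int))) (annotation_subset : Option (List String)) : List (List String) :=
  let columns := annotations.map (fun av => (av.1, pvColumn av.2 variant_positions))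
  (List.range variant_positions.length).map (pvAssemble annotation_subset columns)

-- ===== PRECONDITION & SPEC =====
def Spec_annotate_variants (variant_positions : List Int) (annotations : List (String × List (Int × Int))) (annotation_subset : Option (List String)) (out : List (List String)) : Prop := out = annotate_variants_alt variant_positions annotations annotation_subset
instance (variant_positions : List Int) (annotations : List (String × List (Int × Int))) (annotation_subset : Option (List String)) (out : List (List String)) : Decidable (Spec_annotate_variants variant_positions annotations annotation_subset out) := by unfold Spec_annotate_variants; infer_instance

-- ===== CLAIM (what is proved, stated in full; the proofs are below) =====
def Claim_equal_annotate_variants : Prop := ∀ (variant_positions : List Int) (annotations : List (String × List (Int × Int))) (annotation_subset : Option (List String)), Dom_annotate_variants variant_positions annotations annotation_subset → Spec_annotate_variants variant_positions annotations annotation_subset (annotate_variants variant_positions annotations annotation_subset)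

-- ===== LEMMAS AND PROOFS =====

-- the head-hit test on the suffix surviving a variant position
def pvHit (rest : List (Int × Int)) (p : Int) : Bool :=
  match rest with | [] => false | iv :: _ => iv.1 ≤ p

theorem pvScanA_popN (L : List (Int × Int)) (p : Int) :
    pvPopN (pvScanA L p).1 L = L.dropWhile (fun iv => iv.2 < p) := by
  induction L with
  | nil => simp [pvScanA, pvPopN]
  | cons iv rest ih =>
    by_cases h1 : iv.2 < p
    · simpa [pvScanA, h1, pvPopN] using ih
    · by_cases h2 : iv.1 > p <;> simp [pvScanA, h1, h2, pvPopN, List.dropWhile]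

theorem pvScanA_hit (L : List (Int × Int)) (p : Int) :
    (pvScanA L p).2 = pvHit (L.dropWhile (fun iv => iv.2 < p)) p := by
  induction L with
  | nil => simp [pvScanA, pvHit]
  | cons iv rest ih =>
    by_cases h1 : iv.2 < p
    · simpa [pvScanA, h1] using ih
    · by_cases h2 : iv.1 > p
      · simp only [pvScanA, h1, if_false, h2, if_true, List.dropWhile]
        simp [pvHit]
        omega
      · simp only [pvScanA, h1, if_false, h2, List.dropWhile, decide_eq_true_eq]
        simp [pvHit]
        omega

theorem pvColumn_cons (L : List (Int × Int)) (p : Int) (ps : List Int) :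
    pvColumn L (p :: ps) =
      pvHit (L.dropWhile (fun iv => iv.2 < p)) p :: pvColumn (L.dropWhile (fun iv => iv.2 < p)) ps := by
  simp [pvColumn, pvHit]

-- the per-variant row both programs produce
def pvRow (sub : Option (List String)) (p : Int) (anns : List (String × List (Int × Int))) : List String :=
  anns.foldl (fun s av => if pvHit (av.2.dropWhile (fun iv => iv.2 < p)) p then pvAdd sub s av.1 else s)
    PySem.Set.empty

-- A's inner fold, characterised
theorem innerFold_eq (sub : Option (List String)) (p : Int) (anns : List (String × List (Int × Int))) :
    ∀ (acc : List (String × List (Int × Int))) (s : PySem.Set String),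
    anns.foldl (pvStepInnerA sub p) (acc, s)
      = (acc ++ anns.map (fun av => (av.1, av.2.dropWhile (fun iv => iv.2 < p))),
         anns.foldl (fun s av => if pvHit (av.2.dropWhile (fun iv => iv.2 < p)) p then pvAdd sub s av.1 else s) s) := by
  induction anns with
  | nil => intro acc s; simp
  | cons av rest ih =>
    intro acc s
    simp only [List.foldl_cons, List.map_cons]
    rw [ih]
    simp [pvStepInnerA, pvScanA_popN, pvScanA_hit]

theorem pvStepA_eq (sub : Option (List String)) (p : Int)
    (acc : List (List String)) (anns : List (String × List (Int × Int))) :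
    pvStepA sub (acc, anns) p
      = (acc ++ [pvRow sub p anns], anns.map (fun av => (av.1, av.2.dropWhile (fun iv => iv.2 < p)))) := by
  simp [pvStepA, innerFold_eq, pvRow]

-- peeling the accumulator of A's outer fold
theorem outerFold_peel (sub : Option (List String)) (vps : List Int) :
    ∀ (acc : List (List String)) (anns : List (String × List (Int × Int))),
    (vps.foldl (pvStepA sub) (acc, anns)).1
      = acc ++ (vps.foldl (pvStepA sub) (([] : List (List String)), anns)).1 := by
  induction vps with
  | nil => intro acc anns; simp
  | cons p ps ih =>
    intro acc anns
    simp only [List.foldl_cons, pvStepA_eq, List.nil_append]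
    rw [ih, ih [pvRow sub p anns]]
    simp

theorem annotate_variants_cons (p : Int) (ps : List Int)
    (anns : List (String × List (Int × Int))) (sub : Option (List String)) :
    annotate_variants (p :: ps) anns sub
      = pvRow sub p anns
        :: annotate_variants ps (anns.map (fun av => (av.1, av.2.dropWhile (fun iv => iv.2 < p)))) sub := by
  unfold annotate_variants
  simp only [List.foldl_cons, pvStepA_eq, List.nil_append]
  rw [outerFold_peel]
  rfl

theorem pvAssemble_zero (sub : Option (List String)) (p : Int) (ps : List Int)
    (anns : List (String × List (Int × Int))) :
    pvAssemble sub (anns.map (fun av => (av.1, pvColumn av.2 (p :: ps)))) 0 = pvRow sub p anns := by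
  unfold pvAssemble pvRow
  rw [List.foldl_map]
  apply PySem.List.foldl_congr_mem
  intro s av hav
  rw [pvColumn_cons]
  rfl

theorem pvAssemble_succ (sub : Option (List String)) (p : Int) (ps : List Int)
    (anns : List (String × List (Int × Int))) (i : Nat) :
    pvAssemble sub (anns.map (fun av => (av.1, pvColumn av.2 (p :: ps)))) (i + 1)
      = pvAssemble sub
          ((anns.map (fun av => (av.1, av.2.dropWhile (fun iv => iv.2 < p)))).map
            (fun av => (av.1, pvColumn av.2 ps))) i := by
  unfold pvAssemble
  rw [List.foldl_map, List.map_map, List.foldl_map]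
  apply PySem.List.foldl_congr_mem
  intro s av hav
  rw [pvColumn_cons]
  rfl

theorem annotate_variants_alt_cons (p : Int) (ps : List Int)
    (anns : List (String × List (Int × Int))) (sub : Option (List String)) :
    annotate_variants_alt (p :: ps) anns sub
      = pvRow sub p anns
        :: annotate_variants_alt ps (anns.map (fun av => (av.1, av.2.dropWhile (fun iv => iv.2 < p)))) sub := by
  unfold annotate_variants_alt
  simp only [List.length_cons]
  rw [List.range_succ_eq_map, List.map_cons, List.map_map]
  refine congrArg₂ _ (pvAssemble_zero sub p ps anns) ?_
  refine List.map_congr_left ?_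
  intro i _
  simpa [Function.comp] using pvAssemble_succ sub p ps anns i

theorem annotate_variants_eq_alt :
    ∀ (vps : List Int) (anns : List (String × List (Int × Int))) (sub : Option (List String)),
    annotate_variants vps anns sub = annotate_variants_alt vps anns sub := by
  intro vps
  induction vps with
  | nil => intro anns sub; rfl
  | cons p ps ih =>
    intro anns sub
    rw [annotate_variants_cons, annotate_variants_alt_cons, ih]

-- ===== VERDICT (by name: the statement is the Claim_ definition above) =====
theorem annotate_variants_spec : Claim_equal_annotate_variants := by
  intro vps anns sub _
  exact annotate_variants_eq_alt vps anns sub
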